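-- pv_equiv track=rewrite | github.com/fr4iser90/AgentLayer_-_Jetson-Orin-Nano-Super-Developer-Kit-dedicated | plugins/tools/agent/core/coding/coding_edit.py | _line_trimmed_replace
-- ===== SOURCE A (Python) =====
-- def _line_trimmed_replace(content: str, find: str) -> str | None:
--     old_lines = content.split("\n")
--     search_lines = find.split("\n")
--     if search_lines and search_lines[-1] == "":
--         search_lines = search_lines[:-1]
--     for i in range(len(old_lines) - len(search_lines) + 1):
--         if all(
--             old_lines[i + j].strip() == search_lines[j].strip()
--             for j in range(len(search_lines))
--         ):
--             start = sum(len(old_lines[k]) + 1 for k in range(i))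
--             end = start + sum(len(old_lines[i + j]) + 1 for j in range(len(search_lines))) - 1
--             return content[:start] + "{{{REPLACEMENT}}}" + content[end:]
--     return None
-- ===== SOURCE B (Python) =====
-- def _line_trimmed_replace(content: str, find: str) -> str | None:
--     lines = content.split("\n")
--     raw = find.split("\n")
--     if raw and raw[-1] == "":
--         raw = raw[:-1]
--     pat = [l.strip() for l in raw]
--     m = len(pat)
--     offs = [0]
--     for l in lines:
--         offs.append(offs[-1] + len(l) + 1)
--
--     def splice(i):
--         return content[:offs[i]] + "{{{REPLACEMENT}}}" + content[offs[i + m] - 1:]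
--
--     if m == 0:
--         return splice(0)
--
--     def fail(j):
--         # longest proper border of pat[:j] (largest k < j with pat[:k] == pat[j-k:j])
--         for k in range(j - 1, -1, -1):
--             if pat[:k] == pat[j - k:j]:
--                 return k
--         return 0
--
--     # KMP scan: state k = length of the longest prefix of pat that is a
--     # suffix of the stripped lines seen so far; first time k hits m, the
--     # match starts at line q + 1 - m.
--     k = 0
--     for q, line in enumerate(lines):
--         s = line.strip()
--         while k > 0 and pat[k] != s:
--             k = fail(k)
--         if pat[k] == s:
--             k += 1
--         if k == m:
--             return splice(q + 1 - m)
--     return None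
-- ===== Notes on version B (the rewrite author's own statement) =====
-- stated objective: alternative
-- what changed: B searches for the trimmed block with KMP over the stripped lines: a single left-to-right pass keeps the length of the longest pattern prefix that is a suffix of the lines seen so far and shrinks it through the pattern's border (failure) function on mismatch, so no window of lines is ever re-examined, whereas A restarts a full window comparison at every candidate line and re-sums line lengths to locate the splice point (B precomputes prefix-sum offsets once).
import Mathlib
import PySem

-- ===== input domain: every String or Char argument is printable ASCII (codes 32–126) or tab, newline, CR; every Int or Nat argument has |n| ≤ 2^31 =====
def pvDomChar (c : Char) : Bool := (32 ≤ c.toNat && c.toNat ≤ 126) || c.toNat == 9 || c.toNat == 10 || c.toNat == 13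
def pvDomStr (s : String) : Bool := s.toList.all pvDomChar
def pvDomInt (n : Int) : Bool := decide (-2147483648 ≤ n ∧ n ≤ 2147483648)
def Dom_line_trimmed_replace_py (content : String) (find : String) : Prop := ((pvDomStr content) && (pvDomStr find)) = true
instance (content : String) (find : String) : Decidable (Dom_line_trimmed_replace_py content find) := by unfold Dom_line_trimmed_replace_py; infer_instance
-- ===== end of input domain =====

-- B replaces A's naive window-by-window scan by a KMP search over the stripped lines:
-- a single left-to-right pass keeping the length of the longest pattern prefix that is a
-- suffix of the lines read so far, shrinking it through the pattern's border function on
-- mismatch, with splice offsets precomputed once (objective: alternative).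

-- ===== PORT A =====
-- literal transliteration of A: per-candidate `all(old[i+j].strip() == search[j].strip())`,
-- then start/end recomputed as sums of line lengths (indices always in range, so pyGetD is exact).
def pvAllEq (old_lines search_lines : List String) (i : Int) : Bool :=
  (PySem.List.pyRange 0 (search_lines.length : Int) 1).all fun j =>
    PySem.Str.strip (PySem.List.pyGetD old_lines (i + j) "") == PySem.Str.strip (PySem.List.pyGetD search_lines j "")

def pvStart (old_lines : List String) (i : Int) : Int :=
  ((PySem.List.pyRange 0 i 1).map (fun k => PySem.Str.len (PySem.List.pyGetD old_lines k "") + 1)).sum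

def pvEnd (old_lines search_lines : List String) (i : Int) : Int :=
  pvStart old_lines i +
    ((PySem.List.pyRange 0 (search_lines.length : Int) 1).map
      (fun j => PySem.Str.len (PySem.List.pyGetD old_lines (i + j) "") + 1)).sum - 1

def pvALoop (content : String) (old_lines search_lines : List String) : List Int → Option String
  | [] => none
  | i :: rest =>
    if pvAllEq old_lines search_lines i then
      some (String.ofList (PySem.List.slice content.toList none (some (pvStart old_lines i)) ++
        "{{{REPLACEMENT}}}".toList ++
        PySem.List.slice content.toList (some (pvEnd old_lines search_lines i)) none))
    else pvALoop content old_lines search_lines rest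

def line_trimmed_replace_py (content : String) (find : String) : Option String :=
  let old_lines := (PySem.Str.split? content "\n").getD []
  let sl0 := (PySem.Str.split? find "\n").getD []
  let search_lines :=
    if sl0 ≠ [] ∧ PySem.List.pyGetD sl0 (-1) "" = "" then PySem.List.slice sl0 none (some (-1)) else sl0
  pvALoop content old_lines search_lines
    (PySem.List.pyRange 0 ((old_lines.length : Int) - (search_lines.length : Int) + 1) 1)

-- ===== PORT B =====
-- transliteration of Source B (KMP). All list indices/slice bounds in Source B's fail/scan are
-- nonnegative and in range, so `take`/`drop`/`getD` are exact ports of those slices/lookups.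
def pvOffs (lines : List String) : List Int :=
  (lines.foldl (fun (p : List Int × Int) l =>
      ((p.1 ++ [p.2 + PySem.Str.len l + 1]), p.2 + PySem.Str.len l + 1)) ([0], 0)).1

-- Source B's `splice(i)` closure
def pvSplice (content : String) (offs : List Int) (m : Nat) (i : Nat) : String :=
  String.ofList (PySem.List.slice content.toList none (some (PySem.List.pyGetD offs (i : Int) 0)) ++
    "{{{REPLACEMENT}}}".toList ++
    PySem.List.slice content.toList (some (PySem.List.pyGetD offs ((i + m : Nat) : Int) 0 - 1)) none)

-- Source B's `fail(j)`: descending for-loop `for k in range(j-1,-1,-1)` with break on pat[:k]==pat[j-k:j]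
def pvFailDown (pat : List String) (j : Nat) : Nat → Nat
  | 0 => 0
  | k + 1 => if pat.take (k + 1) == (pat.take j).drop (j - (k + 1)) then k + 1 else pvFailDown pat j k

def pvFail (pat : List String) (j : Nat) : Nat := pvFailDown pat j (j - 1)

theorem pvFailDown_le (pat : List String) (j t : Nat) : pvFailDown pat j t ≤ t := by
  induction t with
  | zero => simp [pvFailDown]
  | succ k ih => rw [pvFailDown]; split <;> omega

theorem pvFail_lt (pat : List String) (j : Nat) (h : 1 ≤ j) : pvFail pat j < j :=
  Nat.lt_of_le_of_lt (pvFailDown_le pat j (j - 1)) (by omega)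

-- Source B's `while k > 0 and pat[k] != s: k = fail(k)`
def pvDescend (pat : List String) (s : String) (k : Nat) : Nat :=
  if h : k ≠ 0 ∧ pat.getD k "" ≠ s then pvDescend pat s (pvFail pat k) else k
termination_by k
decreasing_by exact pvFail_lt pat k (by omega)

-- Source B's main for-loop over enumerate(lines) with KMP state k
def pvScan (content : String) (pat : List String) (offs : List Int) (m : Nat) :
    List String → Nat → Nat → Option String
  | [], _, _ => none
  | line :: rest, q, k =>
    let s := PySem.Str.strip line
    let k1 := pvDescend pat s k
    let k2 := if pat.getD k1 "" == s then k1 + 1 else k1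
    if k2 == m then some (pvSplice content offs m (q + 1 - m))
    else pvScan content pat offs m rest (q + 1) k2

def line_trimmed_replace_py_alt (content : String) (find : String) : Option String :=
  let lines := (PySem.Str.split? content "\n").getD []
  let raw0 := (PySem.Str.split? find "\n").getD []
  let raw := if raw0.getLast? == some "" then raw0.dropLast else raw0
  let pat := raw.map PySem.Str.strip
  let m := pat.length
  let offs := pvOffs lines
  if m == 0 then some (pvSplice content offs 0 0)
  else pvScan content pat offs m lines 0 0

-- ===== PRECONDITION & SPEC =====
def Spec_line_trimmed_replace_py (content : String) (find : String) (out : Option String) : Prop := out = line_trimmed_replace_py_alt content find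
instance (content : String) (find : String) (out : Option String) : Decidable (Spec_line_trimmed_replace_py content find out) := by unfold Spec_line_trimmed_replace_py; infer_instance

-- ===== CLAIM (what is proved, stated in full; the proofs are below) =====
def Claim_equal_line_trimmed_replace_py : Prop := ∀ (content : String) (find : String), Dom_line_trimmed_replace_py content find → Spec_line_trimmed_replace_py content find (line_trimmed_replace_py content find)

-- ===== LEMMAS AND PROOFS =====

-- prefix sum of (len + 1) over the first t lines: the common characterization of A's sums and B's offsets
def pvF (L : List String) (t : Nat) : Int :=
  ((L.take t).map (fun l => PySem.Str.len l + 1)).sum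

theorem pvF_succ (L : List String) (k : Nat) (hlt : k < L.length) :
    pvF L (k + 1) = pvF L k + (PySem.Str.len L[k] + 1) := by
  have h2 : k < (L.map (fun l => PySem.Str.len l + 1)).length := by simpa
  unfold pvF
  rw [List.map_take, List.map_take, List.take_add_one, List.getElem?_eq_getElem h2]
  simp

theorem pv_offs_aux (xs : List String) (acc : List Int) (t : Int) :
    (xs.foldl (fun (p : List Int × Int) l =>
      ((p.1 ++ [p.2 + PySem.Str.len l + 1]), p.2 + PySem.Str.len l + 1)) (acc, t)).1
    = acc ++ (List.range xs.length).map (fun k => t + pvF xs (k+1)) := by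
  induction xs generalizing acc t with
  | nil => simp
  | cons l tl ih =>
    simp only [List.foldl_cons]
    rw [ih]
    simp only [List.length_cons, List.range_succ_eq_map, List.map_cons, List.map_map, List.append_assoc]
    congr 1
    simp [pvF, Function.comp]
    constructor
    · ring
    · intro a _; ring

theorem pv_offs_eq (L : List String) :
    pvOffs L = (List.range (L.length + 1)).map (pvF L) := by
  rw [pvOffs, pv_offs_aux]
  simp [List.range_succ_eq_map, List.map_map, Function.comp, pvF]

theorem pv_offs_get (L : List String) (i : Nat) (hi : i ≤ L.length) :
    PySem.List.pyGetD (pvOffs L) (i : Int) 0 = pvF L i := by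
  rw [pv_offs_eq, PySem.List.pyGetD_natCast]
  rw [List.getD_eq_getElem?_getD]
  simp [Nat.lt_succ_of_le hi]

theorem pv_start_eq (L : List String) (i : Nat) (hi : i ≤ L.length) :
    pvStart L (i : Int) = pvF L i := by
  induction i with
  | zero => simp [pvStart, pvF]
  | succ k ih =>
    have hk : k ≤ L.length := Nat.le_of_succ_le hi
    have hlt : k < L.length := hi
    rw [pvStart, show ((k+1 : Nat) : Int) = (k : Int) + 1 by push_cast; ring,
        PySem.List.pyRange_one_succ_right (by positivity)]
    rw [List.map_append, List.sum_append]
    have := ih hk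
    rw [pvStart] at this
    rw [this]
    simp only [List.map_cons, List.map_nil, List.sum_cons, List.sum_nil]
    rw [PySem.List.pyGetD_natCast, List.getD_eq_getElem?_getD, List.getElem?_eq_getElem hlt,
      pvF_succ L k hlt]
    simp

theorem pv_seg (L : List String) (i q : Nat) (h : i + q ≤ L.length) :
    ((PySem.List.pyRange 0 (q : Int) 1).map
      (fun j => PySem.Str.len (PySem.List.pyGetD L ((i : Int) + j) "") + 1)).sum
    = pvF L (i + q) - pvF L i := by
  induction q with
  | zero => simp
  | succ q ih =>
    have hq : i + q ≤ L.length := by omega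
    have hlt : i + q < L.length := by omega
    rw [show ((q+1 : Nat) : Int) = (q : Int) + 1 by push_cast; ring,
        PySem.List.pyRange_one_succ_right (by positivity), List.map_append, List.sum_append,
        ih hq]
    have : (i : Int) + (q : Int) = ((i + q : Nat) : Int) := by push_cast; ring
    rw [List.map_cons, List.map_nil, List.sum_cons, List.sum_nil, this,
        PySem.List.pyGetD_natCast, List.getD_eq_getElem?_getD, List.getElem?_eq_getElem hlt,
        show i + (q+1) = (i + q) + 1 by omega, pvF_succ L (i+q) hlt]
    simp
    ring

theorem pv_end_eq (L S : List String) (i : Nat) (hi : i + S.length ≤ L.length) :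
    pvEnd L S (i : Int) = pvF L (i + S.length) - 1 := by
  rw [pvEnd, pv_start_eq L i (by omega), pv_seg L i S.length hi]
  ring

theorem pv_trim_eq (sl0 : List String) :
    (if sl0.getLast? == some "" then sl0.dropLast else sl0) =
    (if sl0 ≠ [] ∧ PySem.List.pyGetD sl0 (-1) "" = "" then PySem.List.slice sl0 none (some (-1)) else sl0) := by
  rcases eq_or_ne sl0 [] with h | h
  · subst h; simp
  · rw [PySem.List.slice_to_neg_one, PySem.List.pyGetD_neg_one sl0 "" h]
    simp [List.getLast?_eq_some_getLast h, h]

theorem pv_cond_eq (L S : List String) (i : Nat) (hi : i + S.length ≤ L.length) :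
    pvAllEq L S (i : Int) =
      (PySem.List.slice (L.map PySem.Str.strip) (some (i : Int)) (some ((i : Int) + (S.length : Int))) == S.map PySem.Str.strip) := by
  rw [PySem.List.slice_natCast_add]
  rw [Bool.eq_iff_iff, pvAllEq, List.all_eq_true, beq_iff_eq]
  have hlen : (((L.map PySem.Str.strip).drop i).take S.length).length = S.length := by
    simp; omega
  constructor
  · intro hall
    apply List.ext_getElem (by simp [hlen])
    intro j h1 h2
    have hj : j < S.length := by simpa [hlen] using h1
    have hLj : i + j < L.length := by omega
    have := hall ((j : Int)) (by rw [PySem.List.mem_pyRange_one]; constructor <;> [positivity; exact_mod_cast hj])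
    rw [show (i : Int) + (j : Int) = ((i + j : Nat) : Int) by push_cast; ring] at this
    rw [PySem.List.pyGetD_natCast, PySem.List.pyGetD_natCast,
        List.getD_eq_getElem?_getD, List.getElem?_eq_getElem hLj,
        List.getD_eq_getElem?_getD, List.getElem?_eq_getElem hj] at this
    simp only [Option.getD_some, beq_iff_eq] at this
    simp [List.getElem_take, List.getElem_drop, List.getElem_map, this]
  · intro heq j hjmem
    rw [PySem.List.mem_pyRange_one] at hjmem
    obtain ⟨hj0, hjm⟩ := hjmem
    set jN := j.toNat with hjN
    have hj : jN < S.length := by omega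
    have hLj : i + jN < L.length := by omega
    have hjcast : j = (jN : Int) := by omega
    have h1 : jN < (((L.map PySem.Str.strip).drop i).take S.length).length := by omega
    have := List.getElem_of_eq heq h1
    simp only [List.getElem_take, List.getElem_drop, List.getElem_map] at this
    rw [hjcast, show (i : Int) + (jN : Int) = ((i + jN : Nat) : Int) by push_cast; ring,
        PySem.List.pyGetD_natCast, PySem.List.pyGetD_natCast,
        List.getD_eq_getElem?_getD, List.getElem?_eq_getElem hLj,
        List.getD_eq_getElem?_getD, List.getElem?_eq_getElem hj]
    simp [this]

-- naive first-match index, the common specification both loops are reduced to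
def pvFirstFrom (t p : List String) (i : Nat) : Option Nat :=
  if i + p.length ≤ t.length then
    (if (t.drop i).take p.length = p then some i else pvFirstFrom t p (i + 1))
  else none
termination_by t.length + 1 - i
decreasing_by omega

theorem pvFirstFrom_none (t p : List String) (i : Nat)
    (h : ∀ i', i ≤ i' → i' + p.length ≤ t.length → ¬ (t.drop i').take p.length = p) :
    pvFirstFrom t p i = none := by
  rw [pvFirstFrom]
  split
  next hin =>
    rw [if_neg (h i le_rfl hin)]
    exact pvFirstFrom_none t p (i + 1) (fun i' h1 h2 => h i' (by omega) h2)
  next => rfl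
termination_by t.length + 1 - i
decreasing_by omega

theorem pvFirstFrom_some (t p : List String) (i : Nat) (a : Nat) (ha : a ≤ i)
    (hin : i + p.length ≤ t.length) (hm : (t.drop i).take p.length = p)
    (h : ∀ i', i' < i → i' + p.length ≤ t.length → ¬ (t.drop i').take p.length = p) :
    pvFirstFrom t p a = some i := by
  rcases Nat.eq_or_lt_of_le ha with rfl | hlt
  · rw [pvFirstFrom, if_pos hin, if_pos hm]
  · rw [pvFirstFrom, if_pos (by omega), if_neg (h a hlt (by omega))]
    exact pvFirstFrom_some t p i (a + 1) (by omega) hin hm h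
termination_by i - a
decreasing_by omega

-- ---- A-side: the naive loop equals pvFirstFrom mapped through the splice ----
theorem pv_aloop_eq (content : String) (L S : List String) (a : Nat) :
    pvALoop content L S (PySem.List.pyRange (a : Int) ((L.length : Int) - (S.length : Int) + 1) 1)
      = (pvFirstFrom (L.map PySem.Str.strip) (S.map PySem.Str.strip) a).map
          (pvSplice content (pvOffs L) S.length) := by
  by_cases hend : (L.length : Int) - (S.length : Int) + 1 ≤ (a : Int)
  · rw [PySem.List.pyRange_one_eq_nil hend, pvFirstFrom,
      if_neg (by rw [List.length_map, List.length_map]; omega)]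
    simp [pvALoop]
  · push_neg at hend
    have hin : a + S.length ≤ L.length := by omega
    rw [PySem.List.pyRange_one_cons hend]
    simp only [pvALoop]
    rw [pv_cond_eq L S a hin, PySem.List.slice_natCast_add, pvFirstFrom]
    have hcnt : a + (List.map PySem.Str.strip S).length ≤ (List.map PySem.Str.strip L).length := by
      rw [List.length_map, List.length_map]; omega
    by_cases hc : ((L.map PySem.Str.strip).drop a).take S.length = S.map PySem.Str.strip
    · rw [if_pos (beq_iff_eq.mpr hc)]
      rw [if_pos hcnt]
      rw [if_pos (show List.take (List.map PySem.Str.strip S).length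
            (List.drop a (List.map PySem.Str.strip L)) = List.map PySem.Str.strip S from by
          rw [List.length_map]; exact hc)]
      rw [Option.map_some]
      rw [pvSplice, pv_offs_get L a (by omega), pv_offs_get L (a + S.length) hin,
        pv_start_eq L a (by omega), pv_end_eq L S a hin]
    · rw [if_neg (by simpa using hc)]
      rw [if_pos hcnt]
      rw [if_neg (show ¬ (List.take (List.map PySem.Str.strip S).length
            (List.drop a (List.map PySem.Str.strip L)) = List.map PySem.Str.strip S) from by
          rw [List.length_map]; exact hc)]
      rw [show (a : Int) + 1 = ((a + 1 : Nat) : Int) from by push_cast; ring]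
      exact pv_aloop_eq content L S (a + 1)
termination_by L.length + 1 - a
decreasing_by omega

-- ---- B-side: borders ----

-- suffix of a suffix (same right end, shorter): x <:+ z, y <:+ z, |x| ≤ |y| → x <:+ y
theorem pv_suffix_of_suffix_le {x y z : List String} (hx : x <:+ z) (hy : y <:+ z)
    (hl : x.length ≤ y.length) : x <:+ y := by
  obtain ⟨v, hv⟩ := hx
  obtain ⟨u, hu⟩ := hy
  have hz : u ++ y = v ++ x := hu.trans hv.symm
  have hlen : u.length ≤ v.length := by
    have := congrArg List.length hz; simp at this; omega
  have h2 := congrArg (List.drop u.length) hz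
  rw [List.drop_left, List.drop_append_of_le_length hlen] at h2
  exact ⟨v.drop u.length, h2.symm⟩

theorem pvFail_border (p : List String) (j : Nat) (hj : j ≤ p.length) :
    p.take (pvFail p j) <:+ p.take j := by
  have aux : ∀ t : Nat, pvFailDown p j t = 0 ∨
      (p.take (pvFailDown p j t) = (p.take j).drop (j - pvFailDown p j t)) := by
    intro t
    induction t with
    | zero => exact Or.inl rfl
    | succ k ih =>
      rw [pvFailDown]
      split
      next hc => exact Or.inr (by simpa using hc)
      next => exact ih
  rcases aux (j - 1) with h0 | he
  · rw [pvFail, h0]; simp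
  · rw [pvFail] at *
    rw [he]
    exact List.drop_suffix _ _

theorem pvFail_greatest (p : List String) (j k : Nat) (hj : j ≤ p.length) (hk : k < j)
    (hb : p.take k <:+ p.take j) : k ≤ pvFail p j := by
  have hcond : p.take k = (p.take j).drop (j - k) := by
    have := List.suffix_iff_eq_drop.mp hb
    rwa [List.length_take, List.length_take,
      show min j p.length = j by omega, show min k p.length = k by omega] at this
  have aux : ∀ t : Nat, k ≤ t → k ≤ pvFailDown p j t := by
    intro t
    induction t with
    | zero => intro h; omega
    | succ u ih =>
      intro hku
      rw [pvFailDown]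
      split
      next => omega
      next hcf =>
        rcases Nat.eq_or_lt_of_le hku with heq | hlt
        · exfalso
          apply hcf
          rw [← heq]
          exact beq_iff_eq.mpr hcond
        · exact ih (by omega)
  exact aux (j - 1) (by omega)

-- the while-loop descends the border chain to the largest usable border
theorem pv_descend_spec (p : List String) (s : String) (k : Nat) (hk : k ≤ p.length) :
    pvDescend p s k ≤ k ∧ p.take (pvDescend p s k) <:+ p.take k ∧
      (pvDescend p s k = 0 ∨ p.getD (pvDescend p s k) "" = s) ∧
      (∀ j, j ≤ k → p.take j <:+ p.take k → p.getD j "" = s → j ≤ pvDescend p s k) := by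
  rw [pvDescend]
  split
  next hcond =>
    obtain ⟨hk0, hks⟩ := hcond
    have hfk : pvFail p k < k := pvFail_lt p k (by omega)
    have hb := pvFail_border p k hk
    obtain ⟨ih1, ih2, ih3, ih4⟩ := pv_descend_spec p s (pvFail p k) (by omega)
    refine ⟨by omega, ih2.trans hb, ih3, ?_⟩
    intro j hj hsuf hjs
    have hjk : j ≠ k := fun e => hks (e ▸ hjs)
    have hjlt : j < k := lt_of_le_of_ne hj hjk
    have hjf : j ≤ pvFail p k := pvFail_greatest p k j hk hjlt hsuf
    refine ih4 j hjf ?_ hjs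
    exact pv_suffix_of_suffix_le hsuf hb
      (by rw [List.length_take, List.length_take]; omega)
  next hcond =>
    rw [not_and_or, not_ne_iff, not_ne_iff] at hcond
    refine ⟨le_rfl, List.suffix_refl _, ?_, fun j hj _ _ => hj⟩
    rcases hcond with h0 | hs
    · exact Or.inl h0
    · exact Or.inr hs
termination_by k
decreasing_by exact pvFail_lt p k (by omega)

-- longest prefix of p that is a suffix of t.take q
def pvLp (t p : List String) (q : Nat) : Nat :=
  Nat.findGreatest (fun k => k ≤ q ∧ (t.take q).drop (q - k) = p.take k) p.length

-- one-step characterization of the candidates for pvLp at q+1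
theorem pvP_succ_iff (t p : List String) (q j : Nat) (hq : q < t.length) :
    (j + 1 ≤ q + 1 ∧ (t.take (q + 1)).drop ((q + 1) - (j + 1)) = p.take (j + 1))
      ↔ (j < p.length ∧ (j ≤ q ∧ (t.take q).drop (q - j) = p.take j) ∧ p.getD j "" = t[q]) := by
  constructor
  · rintro ⟨hj1, heq⟩
    have hjq : j ≤ q := by omega
    have hlen := congrArg List.length heq
    rw [List.length_drop, List.length_take, List.length_take] at hlen
    have hjm : j < p.length := by omega
    rw [show q + 1 - (j + 1) = q - j from by omega] at heq
    rw [List.take_add_one, List.take_add_one, List.getElem?_eq_getElem hq,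
      List.getElem?_eq_getElem hjm] at heq
    simp only [Option.toList_some] at heq
    rw [List.drop_append_of_le_length (by rw [List.length_take]; omega)] at heq
    obtain ⟨h1, h2⟩ := List.append_inj heq
      (by rw [List.length_drop, List.length_take, List.length_take]; omega)
    simp only [List.cons.injEq, and_true] at h2
    refine ⟨hjm, ⟨hjq, h1⟩, ?_⟩
    rw [List.getD_eq_getElem?_getD, List.getElem?_eq_getElem hjm]
    simpa using h2.symm
  · rintro ⟨hjm, ⟨hjq, heq⟩, hgd⟩
    refine ⟨by omega, ?_⟩
    rw [show q + 1 - (j + 1) = q - j from by omega]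
    rw [List.take_add_one, List.take_add_one, List.getElem?_eq_getElem hq,
      List.getElem?_eq_getElem hjm]
    simp only [Option.toList_some]
    rw [List.drop_append_of_le_length (by rw [List.length_take]; omega), heq]
    congr 1
    rw [List.getD_eq_getElem?_getD, List.getElem?_eq_getElem hjm] at hgd
    simpa using hgd.symm

theorem pvLp_zero (t p : List String) : pvLp t p 0 = 0 := by
  rw [pvLp, Nat.findGreatest_eq_zero_iff]
  intro n hn _ hP
  omega

theorem pvLp_succ (t p : List String) (q : Nat) (hq : q < t.length) (hm : 0 < p.length)
    (hk : pvLp t p q < p.length) :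
    pvLp t p (q + 1) =
      (if p.getD (pvDescend p t[q] (pvLp t p q)) "" == t[q]
       then pvDescend p t[q] (pvLp t p q) + 1 else pvDescend p t[q] (pvLp t p q)) := by
  have hP0q : ∀ q' : Nat, 0 ≤ q' ∧ (t.take q').drop (q' - 0) = p.take 0 := by
    intro q'
    refine ⟨Nat.zero_le q', ?_⟩
    rw [List.take_zero, List.drop_eq_nil_of_le (by rw [List.length_take]; omega)]
  have hspecq := Nat.findGreatest_spec
    (P := fun k => k ≤ q ∧ (t.take q).drop (q - k) = p.take k) (Nat.zero_le p.length) (hP0q q)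
  rw [← pvLp] at hspecq
  obtain ⟨hkq, hkeq⟩ := hspecq
  obtain ⟨hr_le, hr_suf, hr_stop, hr_max⟩ := pv_descend_spec p t[q] (pvLp t p q) (le_of_lt hk)
  have hsufk : p.take (pvLp t p q) <:+ t.take q := hkeq ▸ List.drop_suffix _ _
  have hcand : ∀ j, j < p.length → j ≤ q → (t.take q).drop (q - j) = p.take j →
      p.getD j "" = t[q] → j ≤ pvDescend p t[q] (pvLp t p q) := by
    intro j hjm hjq hjeq hjs
    have hjk : j ≤ pvLp t p q := by
      by_contra hgt
      push_neg at hgt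
      exact Nat.findGreatest_is_greatest
        (P := fun k => k ≤ q ∧ (t.take q).drop (q - k) = p.take k)
        (by rw [pvLp] at hgt; exact hgt) (le_of_lt hjm) ⟨hjq, hjeq⟩
    have hsufj : p.take j <:+ t.take q := hjeq ▸ List.drop_suffix _ _
    have hjsub : p.take j <:+ p.take (pvLp t p q) :=
      pv_suffix_of_suffix_le hsufj hsufk (by rw [List.length_take, List.length_take]; omega)
    exact hr_max j hjk hjsub hjs
  by_cases hrs : p.getD (pvDescend p t[q] (pvLp t p q)) "" = t[q]
  · rw [if_pos (beq_iff_eq.mpr hrs)]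
    apply le_antisymm
    · cases hgl : pvLp t p (q + 1) with
      | zero => omega
      | succ j =>
        have hspec1 := Nat.findGreatest_spec
          (P := fun k => k ≤ q + 1 ∧ (t.take (q + 1)).drop (q + 1 - k) = p.take k)
          (Nat.zero_le p.length) (hP0q (q + 1))
        rw [← pvLp, hgl] at hspec1
        obtain ⟨hjm, ⟨hjq, hjeq⟩, hjs⟩ := (pvP_succ_iff t p q j hq).mp hspec1
        exact Nat.succ_le_succ (hcand j hjm hjq hjeq hjs)
    · refine Nat.le_findGreatest
        (P := fun k => k ≤ q + 1 ∧ (t.take (q + 1)).drop (q + 1 - k) = p.take k)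
        (n := p.length) (by omega) ?_
      refine (pvP_succ_iff t p q (pvDescend p t[q] (pvLp t p q)) hq).mpr
        ⟨by omega, ⟨by omega, ?_⟩, hrs⟩
      have hsr : p.take (pvDescend p t[q] (pvLp t p q)) <:+ t.take q := hr_suf.trans hsufk
      have heq2 := List.suffix_iff_eq_drop.mp hsr
      rw [List.length_take, List.length_take,
        show min q t.length - min (pvDescend p t[q] (pvLp t p q)) p.length
          = q - pvDescend p t[q] (pvLp t p q) from by omega] at heq2
      exact heq2.symm
  · rw [if_neg (by simpa using hrs)]
    have hr0 : pvDescend p t[q] (pvLp t p q) = 0 := by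
      rcases hr_stop with h | h
      · exact h
      · exact absurd h hrs
    rw [hr0]
    cases hgl : pvLp t p (q + 1) with
    | zero => rfl
    | succ j =>
      have hspec1 := Nat.findGreatest_spec
        (P := fun k => k ≤ q + 1 ∧ (t.take (q + 1)).drop (q + 1 - k) = p.take k)
        (Nat.zero_le p.length) (hP0q (q + 1))
      rw [← pvLp, hgl] at hspec1
      obtain ⟨hjm, ⟨hjq, hjeq⟩, hjs⟩ := (pvP_succ_iff t p q j hq).mp hspec1
      have hjr := hcand j hjm hjq hjeq hjs
      exfalso
      apply hrs
      have hj0 : j = 0 := by omega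
      rw [hr0, ← hj0]
      exact hjs

-- full match at the right end ↔ naive window match
theorem pvLp_match (t p : List String) (q : Nat) (hq : q ≤ t.length) (hm : p.length ≤ q) :
    pvLp t p q = p.length ↔ (t.drop (q - p.length)).take p.length = p := by
  have hP0 : 0 ≤ q ∧ (t.take q).drop (q - 0) = p.take 0 := by
    refine ⟨Nat.zero_le _, ?_⟩
    rw [List.take_zero, List.drop_eq_nil_of_le (by rw [List.length_take]; omega)]
  constructor
  · intro hlp
    have hspec := Nat.findGreatest_spec
      (P := fun k => k ≤ q ∧ (t.take q).drop (q - k) = p.take k) (Nat.zero_le p.length) hP0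
    rw [← pvLp, hlp] at hspec
    obtain ⟨_, hspec⟩ := hspec
    rw [List.drop_take, show q - (q - p.length) = p.length from by omega,
      List.take_length] at hspec
    exact hspec
  · intro hwin
    rw [pvLp]
    refine le_antisymm (Nat.findGreatest_le _) (Nat.le_findGreatest le_rfl ?_)
    refine ⟨hm, ?_⟩
    rw [List.drop_take, show q - (q - p.length) = p.length from by omega, List.take_length]
    exact hwin

theorem pvLp_spec (t p : List String) (q : Nat) :
    pvLp t p q ≤ q ∧ (t.take q).drop (q - pvLp t p q) = p.take (pvLp t p q) := by
  have hP0 : 0 ≤ q ∧ (t.take q).drop (q - 0) = p.take 0 := by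
    refine ⟨Nat.zero_le q, ?_⟩
    rw [List.take_zero, List.drop_eq_nil_of_le (by rw [List.length_take]; omega)]
  have := Nat.findGreatest_spec
    (P := fun k => k ≤ q ∧ (t.take q).drop (q - k) = p.take k) (Nat.zero_le p.length) hP0
  rw [← pvLp] at this
  exact this

theorem pvLp_le (t p : List String) (q : Nat) : pvLp t p q ≤ p.length :=
  Nat.findGreatest_le _

-- ---- B-side: the scan loop equals pvFirstFrom mapped through the splice ----
theorem pv_scan_eq (content : String) (L S : List String) (q k : Nat)
    (hq : q ≤ L.length) (hm : 0 < S.length)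
    (hkk : k = pvLp (L.map PySem.Str.strip) (S.map PySem.Str.strip) q) (hklt : k < S.length)
    (hno : ∀ i, i + S.length ≤ q →
      ¬ ((L.map PySem.Str.strip).drop i).take S.length = S.map PySem.Str.strip) :
    pvScan content (S.map PySem.Str.strip) (pvOffs L) S.length (L.drop q) q k
      = (pvFirstFrom (L.map PySem.Str.strip) (S.map PySem.Str.strip) 0).map
          (pvSplice content (pvOffs L) S.length) := by
  rcases Nat.lt_or_ge q L.length with hlt | hge
  · have hTq : q < (L.map PySem.Str.strip).length := by rw [List.length_map]; exact hlt
    have hsq : PySem.Str.strip (L[q]'hlt) = (L.map PySem.Str.strip)[q]'hTq := by simp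
    rw [List.drop_eq_getElem_cons hlt]
    simp only [pvScan]
    have hstep := pvLp_succ (L.map PySem.Str.strip) (S.map PySem.Str.strip) q hTq
      (by rw [List.length_map]; exact hm)
      (by rw [List.length_map]; omega)
    rw [← hsq, ← hkk] at hstep
    rw [← hstep]
    by_cases hfull : pvLp (L.map PySem.Str.strip) (S.map PySem.Str.strip) (q + 1) = S.length
    · rw [if_pos (beq_iff_eq.mpr hfull)]
      have hfull' : pvLp (L.map PySem.Str.strip) (S.map PySem.Str.strip) (q + 1)
          = (S.map PySem.Str.strip).length := by rw [List.length_map]; exact hfull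
      have hmle : S.length ≤ q + 1 := by
        have := (pvLp_spec (L.map PySem.Str.strip) (S.map PySem.Str.strip) (q + 1)).1
        omega
      have hwin := (pvLp_match (L.map PySem.Str.strip) (S.map PySem.Str.strip) (q + 1)
        (by rw [List.length_map]; omega) (by rw [List.length_map]; omega)).mp hfull'
      rw [pvFirstFrom_some (L.map PySem.Str.strip) (S.map PySem.Str.strip)
        (q + 1 - (S.map PySem.Str.strip).length) 0 (Nat.zero_le _)
        (by rw [List.length_map, List.length_map]; omega) hwin ?earlier]
      case earlier =>
        intro i' hi1 hi2
        rw [List.length_map] at hi1 hi2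
        rw [List.length_map]
        exact hno i' (by omega)
      rw [Option.map_some]
      rw [show q + 1 - (S.map PySem.Str.strip).length = q + 1 - S.length from by
        rw [List.length_map]]
    · rw [if_neg (by simpa using hfull)]
      refine pv_scan_eq content L S (q + 1) _ (by omega) hm rfl ?_ ?_
      · have := pvLp_le (L.map PySem.Str.strip) (S.map PySem.Str.strip) (q + 1)
        rw [List.length_map] at this
        omega
      · intro i hi hmat
        rcases Nat.lt_or_ge (i + S.length) (q + 1) with hlt2 | hge2
        · exact hno i (by omega) hmat
        · have hieq : i = q + 1 - S.length := by omega
          apply hfull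
          have : pvLp (L.map PySem.Str.strip) (S.map PySem.Str.strip) (q + 1)
              = (S.map PySem.Str.strip).length :=
            (pvLp_match (L.map PySem.Str.strip) (S.map PySem.Str.strip) (q + 1)
              (by rw [List.length_map]; omega) (by rw [List.length_map]; omega)).mpr
              (by rw [List.length_map, ← hieq]; exact hmat)
          rw [List.length_map] at this
          exact this
  · rw [List.drop_eq_nil_of_le hge]
    rw [pvFirstFrom_none (L.map PySem.Str.strip) (S.map PySem.Str.strip) 0 ?hall]
    case hall =>
      intro i' _ hi2
      rw [List.length_map, List.length_map] at hi2
      rw [List.length_map]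
      exact hno i' (by omega)
    rfl
termination_by L.length - q
decreasing_by omega

theorem pv_main (content find : String) :
    line_trimmed_replace_py content find = line_trimmed_replace_py_alt content find := by
  rw [line_trimmed_replace_py, line_trimmed_replace_py_alt, ← pv_trim_eq]
  set L := (PySem.Str.split? content "\n").getD [] with hL
  set S0 := (PySem.Str.split? find "\n").getD [] with hS0def
  set S := (if S0.getLast? == some "" then S0.dropLast else S0) with hSdef
  by_cases hm0 : S.length = 0
  · have hSnil : S = [] := List.eq_nil_of_length_eq_zero hm0
    rw [if_pos (by rw [List.length_map]; simpa using hm0)]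
    rw [show (0 : Int) = ((0 : Nat) : Int) from by norm_num, pv_aloop_eq content L S 0]
    rw [hSnil]
    simp [pvFirstFrom]
  · rw [if_neg (by rw [List.length_map]; simpa using hm0)]
    rw [show (0 : Int) = ((0 : Nat) : Int) from by norm_num, pv_aloop_eq content L S 0]
    have hs := pv_scan_eq content L S 0 0 (Nat.zero_le _) (by omega)
      (pvLp_zero _ _).symm (by omega)
      (by intro i hi; exact absurd hi (by omega))
    rw [List.drop_zero] at hs
    rw [List.length_map, hs]

-- ===== VERDICT (by name: the statement is the Claim_ definition above) =====
theorem line_trimmed_replace_py_spec : Claim_equal_line_trimmed_replace_py := by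
  intro content find _
  exact pv_main content find
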